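-- pv_equiv track=rewrite | github.com/amusamih/agentic-meio | src/meio/evaluation/broad_eval_analysis.py | _schedule_family
-- ===== SOURCE A (Python) =====
-- def _schedule_family(labels: tuple[str, ...]) -> str:
--     if not labels:
--         return "other"
--     shift_indices = [index for index, label in enumerate(labels) if label == "demand_regime_shift"]
--     recovery_indices = [index for index, label in enumerate(labels) if label == "recovery"]
--     if not shift_indices:
--         return "false_alarm_only" if recovery_indices else "other"
--     first_shift = shift_indices[0]
--     if any(index < first_shift for index in recovery_indices):
--         return "false_alarm_mixed"
--     if len(shift_indices) == 1:
--         if any(index > first_shift for index in recovery_indices):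
--             return "single_shift_recovery"
--         return "single_shift_only"
--     if any(later == earlier + 1 for earlier, later in zip(shift_indices, shift_indices[1:])):
--         return "adjacent_repeated_stress"
--     return "relapse_or_gap"
-- ===== SOURCE B (Python) =====
-- def _schedule_family(labels: tuple[str, ...]) -> str:
--     first_shift = None
--     shift_count = 0
--     prev_shift = None
--     adjacent = False
--     rec_before = False
--     rec_after = False
--     for i, lab in enumerate(labels):
--         if lab == "demand_regime_shift":
--             shift_count += 1
--             if first_shift is None:
--                 first_shift = i
--             if prev_shift is not None and i == prev_shift + 1:
--                 adjacent = True
--             prev_shift = i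
--         elif lab == "recovery":
--             if first_shift is None:
--                 rec_before = True
--             else:
--                 rec_after = True
--     if not labels:
--         return "other"
--     if shift_count == 0:
--         return "false_alarm_only" if rec_before else "other"
--     if rec_before:
--         return "false_alarm_mixed"
--     if shift_count == 1:
--         return "single_shift_recovery" if rec_after else "single_shift_only"
--     return "adjacent_repeated_stress" if adjacent else "relapse_or_gap"
-- ===== Notes on version B (the rewrite author's own statement) =====
-- stated objective: faster
-- what changed: Replaces A's two enumerate-filter passes plus three any-scans over the index lists by a single pass over the labels that maintains first-shift, shift count, previous shift index, an adjacency flag and recovery-before/after flags, then applies the same decision tree to the final state.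
import Mathlib
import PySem

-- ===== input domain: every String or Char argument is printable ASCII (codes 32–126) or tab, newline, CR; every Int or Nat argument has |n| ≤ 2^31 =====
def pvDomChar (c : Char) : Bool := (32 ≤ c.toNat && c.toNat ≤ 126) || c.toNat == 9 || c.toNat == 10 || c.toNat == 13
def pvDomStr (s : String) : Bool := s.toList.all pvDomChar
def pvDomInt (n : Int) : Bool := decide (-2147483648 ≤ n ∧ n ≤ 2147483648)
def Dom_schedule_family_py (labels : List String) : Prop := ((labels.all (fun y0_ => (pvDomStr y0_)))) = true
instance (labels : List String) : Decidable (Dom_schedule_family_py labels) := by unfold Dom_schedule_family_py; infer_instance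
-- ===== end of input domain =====

-- B replaces A's multiple enumerate/filter passes and any-scans by one fold over the labels
-- maintaining first-shift, count, previous shift, adjacency and recovery-before/after flags (objective: faster by a constant factor, measured).

-- ===== PORT A =====
def schedule_family_py (labels : List String) : String :=
  if labels = [] then "other" else
  let shift_indices := ((PySem.List.enumerate labels 0).filter (fun p => p.2 == "demand_regime_shift")).map (·.1)
  let recovery_indices := ((PySem.List.enumerate labels 0).filter (fun p => p.2 == "recovery")).map (·.1)
  match shift_indices with
  | [] => if recovery_indices ≠ [] then "false_alarm_only" else "other"
  | first_shift :: _ =>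
    if recovery_indices.any (fun r => decide (r < first_shift)) then "false_alarm_mixed"
    else if shift_indices.length = 1 then
      (if recovery_indices.any (fun r => decide (first_shift < r)) then "single_shift_recovery"
       else "single_shift_only")
    else if (shift_indices.zip shift_indices.tail).any (fun q => q.2 == q.1 + 1) then
      "adjacent_repeated_stress"
    else "relapse_or_gap"

-- ===== PORT B =====
structure PvState where
  first : Option Int
  count : Int
  prev : Option Int
  adj : Bool
  recB : Bool
  recA : Bool
deriving Repr, DecidableEq

def pvInit : PvState := ⟨none, 0, none, false, false, false⟩

def pvStep (s : PvState) (p : Int × String) : PvState :=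
  if p.2 = "demand_regime_shift" then
    { first := (s.first).or (some p.1)
      count := s.count + 1
      prev := some p.1
      adj := s.adj || (match s.prev with | none => false | some q => decide (p.1 = q + 1))
      recB := s.recB
      recA := s.recA }
  else if p.2 = "recovery" then
    (if s.first = none then { s with recB := true } else { s with recA := true })
  else s

def schedule_family_py_alt (labels : List String) : String :=
  let s := (PySem.List.enumerate labels 0).foldl pvStep pvInit
  if labels = [] then "other"
  else if s.count = 0 then (if s.recB then "false_alarm_only" else "other")
  else if s.recB then "false_alarm_mixed"
  else if s.count = 1 then (if s.recA then "single_shift_recovery" else "single_shift_only")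
  else if s.adj then "adjacent_repeated_stress"
  else "relapse_or_gap"

-- ===== PRECONDITION & SPEC =====
def Spec_schedule_family_py (labels : List String) (out : String) : Prop := out = schedule_family_py_alt labels
instance (labels : List String) (out : String) : Decidable (Spec_schedule_family_py labels out) := by unfold Spec_schedule_family_py; infer_instance

-- ===== CLAIM (what is proved, stated in full; the proofs are below) =====
def Claim_equal_schedule_family_py : Prop := ∀ (labels : List String), Dom_schedule_family_py labels → Spec_schedule_family_py labels (schedule_family_py labels)

-- ===== LEMMAS AND PROOFS =====

/-- the shift indices of `l` when enumeration starts at `n` -/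
def pvShifts (n : Int) (l : List String) : List Int :=
  ((PySem.List.enumerate l n).filter (fun p => p.2 == "demand_regime_shift")).map (·.1)

/-- the recovery indices of `l` when enumeration starts at `n` -/
def pvRecs (n : Int) (l : List String) : List Int :=
  ((PySem.List.enumerate l n).filter (fun p => p.2 == "recovery")).map (·.1)

def pvAdj (S : List Int) : Bool := (S.zip S.tail).any (fun q => q.2 == q.1 + 1)

def pvCross (p h : Option Int) : Bool :=
  match p, h with
  | some p, some h => decide (h = p + 1)
  | _, _ => false

def pvBefore (r : Int) (h : Option Int) : Bool :=
  match h with | none => true | some h => decide (r < h)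

def pvAfter (r : Int) (h : Option Int) : Bool :=
  match h with | none => false | some h => decide (h < r)

lemma pv_ext {s t : PvState} (h1 : s.first = t.first) (h2 : s.count = t.count)
    (h3 : s.prev = t.prev) (h4 : s.adj = t.adj) (h5 : s.recB = t.recB) (h6 : s.recA = t.recA) :
    s = t := by
  cases s; cases t; simp_all

lemma pvShifts_cons_shift (n : Int) (l : List String) :
    pvShifts n ("demand_regime_shift" :: l) = n :: pvShifts (n+1) l := by
  simp [pvShifts, PySem.List.enumerate_cons]

lemma pvShifts_cons_other {a : String} (h : a ≠ "demand_regime_shift") (n : Int) (l : List String) :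
    pvShifts n (a :: l) = pvShifts (n+1) l := by
  simp [pvShifts, PySem.List.enumerate_cons, h]

lemma pvRecs_cons_rec (n : Int) (l : List String) :
    pvRecs n ("recovery" :: l) = n :: pvRecs (n+1) l := by
  simp [pvRecs, PySem.List.enumerate_cons]

lemma pvRecs_cons_other {a : String} (h : a ≠ "recovery") (n : Int) (l : List String) :
    pvRecs n (a :: l) = pvRecs (n+1) l := by
  simp [pvRecs, PySem.List.enumerate_cons, h]

lemma pvShifts_ge (n : Int) (l : List String) : ∀ x ∈ pvShifts n l, n ≤ x := by
  intro x hx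
  simp only [pvShifts, List.mem_map, List.mem_filter] at hx
  obtain ⟨p, ⟨hp, _⟩, rfl⟩ := hx
  rw [PySem.List.mem_enumerate_iff] at hp
  obtain ⟨k, hk, rfl⟩ := hp
  simp

lemma pvRecs_ge (n : Int) (l : List String) : ∀ x ∈ pvRecs n l, n ≤ x := by
  intro x hx
  simp only [pvRecs, List.mem_map, List.mem_filter] at hx
  obtain ⟨p, ⟨hp, _⟩, rfl⟩ := hx
  rw [PySem.List.mem_enumerate_iff] at hp
  obtain ⟨k, hk, rfl⟩ := hp
  simp

lemma pvAdj_cons (n : Int) (S : List Int) :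
    pvAdj (n :: S) = (pvCross (some n) S.head? || pvAdj S) := by
  cases S with
  | nil => simp [pvAdj, pvCross]
  | cons h t =>
    by_cases hh : h = n + 1 <;> simp [pvAdj, pvCross, hh]

lemma pvGetLast?_cons (n : Int) (S : List Int) :
    (n :: S).getLast? = S.getLast?.or (some n) := by
  induction S generalizing n with
  | nil => simp
  | cons h t ih =>
    rw [List.getLast?_cons_cons, ih h]
    cases t.getLast? <;> simp

/-- loop invariant: the fold over `enumerate l n` from any state. -/
lemma pvFold_inv (l : List String) : ∀ (n : Int) (s : PvState),
    (PySem.List.enumerate l n).foldl pvStep s =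
    { first := s.first.or (pvShifts n l).head?
      count := s.count + (pvShifts n l).length
      prev := (pvShifts n l).getLast?.or s.prev
      adj := s.adj || pvCross s.prev (pvShifts n l).head? || pvAdj (pvShifts n l)
      recB := s.recB || (s.first.isNone && (pvRecs n l).any (fun r => pvBefore r (pvShifts n l).head?))
      recA := s.recA || (pvRecs n l).any (fun r => s.first.isSome || pvAfter r (pvShifts n l).head?) } := by
  induction l with
  | nil =>
    intro n s
    apply pv_ext <;> simp [PySem.List.enumerate_nil, pvShifts, pvRecs, pvAdj]
    cases s.prev <;> simp [pvCross]
  | cons a l ih =>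
    intro n s
    rw [PySem.List.enumerate_cons, List.foldl_cons, ih (n+1)]
    have hR := pvRecs_ge (n+1) l
    have hhead : ∀ h ∈ (pvShifts (n+1) l).head?, n + 1 ≤ h := by
      intro h hh
      cases hx : pvShifts (n+1) l with
      | nil => simp [hx] at hh
      | cons y t =>
        rw [hx] at hh; simp at hh
        exact hh ▸ pvShifts_ge (n+1) l y (by simp [hx])
    by_cases h1 : a = "demand_regime_shift"
    · subst h1
      rw [pvShifts_cons_shift, pvRecs_cons_other (by decide)]
      apply pv_ext
      · simp only [pvStep]
        cases s.first <;> simp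
      · simp only [pvStep]
        simp; ring
      · rw [pvGetLast?_cons]
        simp only [pvStep]
        cases (pvShifts (n+1) l).getLast? <;> simp
      · rw [pvAdj_cons]
        simp only [pvStep, List.head?_cons]
        cases s.prev <;> cases hh : (pvShifts (n+1) l).head? <;>
          simp [pvCross, Bool.or_assoc, Bool.or_comm, Bool.or_left_comm]
      · simp only [pvStep, List.head?_cons]
        have h0 : (pvRecs (n+1) l).any (fun r => pvBefore r (some n)) = (pvRecs (n+1) l).any (fun _ => false) := by
          apply PySem.List.any_congr_mem
          intro x hx
          have := hR x hx
          simp [pvBefore]; omega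
        cases s.first <;> simp [h0]
      · simp only [pvStep, List.head?_cons]
        have h2 : (pvRecs (n+1) l).any (fun r => ((s.first.or (some n)).isSome || pvAfter r (pvShifts (n+1) l).head?))
               = (pvRecs (n+1) l).any (fun _ => true) := by
          apply PySem.List.any_congr_mem
          intro x hx; cases s.first <;> simp
        have h3 : (pvRecs (n+1) l).any (fun r => (s.first.isSome || pvAfter r (some n)))
               = (pvRecs (n+1) l).any (fun _ => true) := by
          apply PySem.List.any_congr_mem
          intro x hx
          have := hR x hx
          simp [pvAfter]; omega
        simp [h3]
    · by_cases h2 : a = "recovery"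
      · subst h2
        rw [pvShifts_cons_other (by decide), pvRecs_cons_rec]
        have hbn : pvBefore n (pvShifts (n+1) l).head? = true := by
          cases hx : (pvShifts (n+1) l).head? with
          | none => simp [pvBefore]
          | some h => have := hhead h (by simp [hx]); simp [pvBefore]; omega
        have han : pvAfter n (pvShifts (n+1) l).head? = false := by
          cases hx : (pvShifts (n+1) l).head? with
          | none => simp [pvAfter]
          | some h => have := hhead h (by simp [hx]); simp [pvAfter]; omega
        cases hf : s.first with
        | none =>
          simp only [pvStep, if_neg (by decide : ¬("recovery" : String) = "demand_regime_shift"),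
            hf]
          apply pv_ext <;> simp [hbn, han]
        | some f =>
          simp only [pvStep, if_neg (by decide : ¬("recovery" : String) = "demand_regime_shift"),
            hf]
          simp only [if_neg (by simp : ¬(some f = (none : Option Int)))]
          apply pv_ext <;> simp [hbn]
      · rw [pvShifts_cons_other h1, pvRecs_cons_other h2]
        simp only [pvStep]
        rw [if_neg h1, if_neg h2]

-- ===== VERDICT (by name: the statement is the Claim_ definition above) =====
theorem schedule_family_py_spec : Claim_equal_schedule_family_py := by
  intro labels _
  unfold Spec_schedule_family_py schedule_family_py schedule_family_py_alt
  rw [pvFold_inv labels 0 pvInit]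
  by_cases hnil : labels = []
  · simp [hnil]
  · simp only [if_neg hnil]
    have hSdef : ((PySem.List.enumerate labels 0).filter (fun p => p.2 == "demand_regime_shift")).map (·.1) = pvShifts 0 labels := rfl
    have hRdef : ((PySem.List.enumerate labels 0).filter (fun p => p.2 == "recovery")).map (·.1) = pvRecs 0 labels := rfl
    rw [hSdef, hRdef]
    cases hS : pvShifts 0 labels with
    | nil =>
      simp only [pvInit]
      cases hRc : pvRecs 0 labels with
      | nil => simp [pvBefore]
      | cons r t => simp [pvBefore]
    | cons f rest =>
      simp only [pvInit]
      have hc : ((0 : Int) + ((f :: rest).length : Int) = 0) = False := by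
        simp; omega
      have hc1 : ((0 : Int) + ((f :: rest).length : Int) = 1) ↔ ((f :: rest).length = 1) := by
        omega
      simp only [Option.isNone_none, Bool.true_and, Option.isSome_none, Bool.false_or,
        Bool.or_self, pvCross, List.head?_cons, hc, if_false, Bool.false_or]
      have hB : (pvRecs 0 labels).any (fun r => pvBefore r (some f)) = (pvRecs 0 labels).any (fun r => decide (r < f)) := rfl
      have hA : (pvRecs 0 labels).any (fun r => pvAfter r (some f)) = (pvRecs 0 labels).any (fun r => decide (f < r)) := rfl
      rw [hB, hA]
      by_cases hb : (pvRecs 0 labels).any (fun r => decide (r < f)) = true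
      · simp [hb]
      · simp only [Bool.not_eq_true] at hb
        simp only [hb, Bool.false_eq_true, if_false]
        rw [if_congr hc1 rfl rfl]
        by_cases hl : (f :: rest).length = 1
        · simp [hl]
        · simp only [if_neg hl, pvAdj, List.tail_cons]
          rfl
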